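-- pv_equiv track=rewrite | github.com/Berkyx/TicTacToe | TicTacToe.py | assess_victory
-- ===== SOURCE A (Python) =====
-- def validate_line(segment, symbol):
--     return all(x == symbol for x in segment)
--
-- def assess_victory(grid, symbol, win_cond=3):
--     dimensions = len(grid)
--     for row in range(dimensions):
--         for col in range(dimensions):
--             if col + win_cond <= dimensions:  # Horizontal check
--                 if validate_line([grid[row][i] for i in range(col, col + win_cond)], symbol):
--                     return True
--             if row + win_cond <= dimensions:  # Vertical check
--                 if validate_line([grid[i][col] for i in range(row, row + win_cond)], symbol):
--                     return True
--             if row + win_cond <= dimensions and col + win_cond <= dimensions:  # Diagonal check down-right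
--                 if validate_line([grid[i][i + col - row] for i in range(row, row + win_cond)], symbol):
--                     return True
--             if row + win_cond <= dimensions and col - win_cond >= -1:  # Diagonal check up-right
--                 if validate_line([grid[i][col - (i - row)] for i in range(row, row + win_cond)], symbol):
--                     return True
--     return False
-- ===== SOURCE B (Python) =====
-- def assess_victory(grid, symbol, win_cond=3):
--     # one linear run-length scan per line (rows, columns, both diagonal families)
--     # instead of re-testing a fresh win_cond-long window at every cell
--     n = len(grid)
--     if win_cond > n:          # no window of that length fits on an n x n board
--         return False
--
--     def scan(cells):
--         run = 0
--         for x in cells: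
--             run = run + 1 if x == symbol else 0
--             if run >= win_cond:
--                 return True
--         return False
--
--     for r in range(n):                                    # rows
--         if scan(grid[r][c] for c in range(n)):
--             return True
--     for c in range(n):                                    # columns
--         if scan(grid[r][c] for r in range(n)):
--             return True
--     for j in range(n):                                    # down-right diagonals from top row
--         if scan(grid[i][j + i] for i in range(n - j)):
--             return True
--     for i in range(1, n):                                 # down-right diagonals from left column
--         if scan(grid[i + t][t] for t in range(n - i)):
--             return True
--     for j in range(n):                                    # down-left diagonals from top row
--         if scan(grid[t][j - t] for t in range(j + 1)):
--             return True
--     for i in range(1, n):                                 # down-left diagonals from right column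
--         if scan(grid[i + t][n - 1 - t] for t in range(n - i)):
--             return True
--     return False
-- ===== Notes on version B (the rewrite author's own statement) =====
-- stated objective: faster
-- what changed: Replaces A's per-cell re-validation of a fresh win_cond-length window in 4 directions (O(n^2*k) cell reads) by a single linear run-length scan along every row, column and diagonal (O(n^2) total).
-- outside the precondition, e.g. on assess_victory([[], ['']], 'ab', -1): A returns True, B raises IndexError; on assess_victory([['X'], ['X']], 'X', 1): A returns True, B returns True
import Mathlib
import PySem

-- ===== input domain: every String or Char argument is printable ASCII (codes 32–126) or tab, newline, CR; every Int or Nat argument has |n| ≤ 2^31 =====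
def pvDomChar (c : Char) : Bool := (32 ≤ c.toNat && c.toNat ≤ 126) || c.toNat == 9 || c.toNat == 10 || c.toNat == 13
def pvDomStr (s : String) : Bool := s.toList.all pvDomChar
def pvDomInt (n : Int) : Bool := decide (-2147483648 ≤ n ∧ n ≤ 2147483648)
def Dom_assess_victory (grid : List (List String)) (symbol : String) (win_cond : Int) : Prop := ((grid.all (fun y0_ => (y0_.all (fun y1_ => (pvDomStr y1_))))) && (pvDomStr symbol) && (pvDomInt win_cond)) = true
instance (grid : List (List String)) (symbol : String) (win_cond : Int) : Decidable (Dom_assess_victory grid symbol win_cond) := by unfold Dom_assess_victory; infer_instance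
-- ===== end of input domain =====

-- B replaces A's per-cell re-check of every win_cond-long window (4 directions per cell)
-- by one linear run-length scan along each row, column and diagonal; measurably faster.


-- ===== PORT A =====
-- grid[r][i]: Python raises IndexError out of range; exact under Pre_ (all accesses in range there)
def pyCell (grid : List (List String)) (r i : Int) : String :=
  PySem.List.pyGetD (PySem.List.pyGetD grid r []) i ""

def validate_line (segment : List String) (symbol : String) : Bool :=
  segment.all (fun x => x == symbol)

def assess_victory (grid : List (List String)) (symbol : String) (win_cond : Int) : Bool :=
  let dimensions : Int := (grid.length : Int)
  (PySem.List.pyRange 0 dimensions 1).any (fun row =>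
    (PySem.List.pyRange 0 dimensions 1).any (fun col =>
      (decide (col + win_cond ≤ dimensions) &&
        validate_line ((PySem.List.pyRange col (col + win_cond) 1).map (fun i => pyCell grid row i)) symbol) ||
      (decide (row + win_cond ≤ dimensions) &&
        validate_line ((PySem.List.pyRange row (row + win_cond) 1).map (fun i => pyCell grid i col)) symbol) ||
      ((decide (row + win_cond ≤ dimensions) && decide (col + win_cond ≤ dimensions)) &&
        validate_line ((PySem.List.pyRange row (row + win_cond) 1).map (fun i => pyCell grid i (i + col - row))) symbol) ||
      ((decide (row + win_cond ≤ dimensions) && decide (col - win_cond ≥ -1)) &&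
        validate_line ((PySem.List.pyRange row (row + win_cond) 1).map (fun i => pyCell grid i (col - (i - row)))) symbol)))

-- ===== PORT B =====
-- Source B's inner `scan`: run-length counter with early exit
def scanRun (symbol : String) (win_cond : Int) (run : Int) : List String → Bool
  | [] => false
  | x :: xs =>
    let run' := if x == symbol then run + 1 else 0
    if win_cond ≤ run' then true else scanRun symbol win_cond run' xs

def assess_victory_alt (grid : List (List String)) (symbol : String) (win_cond : Int) : Bool :=
  let n : Int := (grid.length : Int)
  if n < win_cond then false else
  ((PySem.List.pyRange 0 n 1).any (fun r =>
      scanRun symbol win_cond 0 ((PySem.List.pyRange 0 n 1).map (fun c => pyCell grid r c)))) ||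
  ((PySem.List.pyRange 0 n 1).any (fun c =>
      scanRun symbol win_cond 0 ((PySem.List.pyRange 0 n 1).map (fun r => pyCell grid r c)))) ||
  ((PySem.List.pyRange 0 n 1).any (fun j =>
      scanRun symbol win_cond 0 ((PySem.List.pyRange 0 (n - j) 1).map (fun i => pyCell grid i (j + i))))) ||
  ((PySem.List.pyRange 1 n 1).any (fun i =>
      scanRun symbol win_cond 0 ((PySem.List.pyRange 0 (n - i) 1).map (fun t => pyCell grid (i + t) t)))) ||
  ((PySem.List.pyRange 0 n 1).any (fun j =>
      scanRun symbol win_cond 0 ((PySem.List.pyRange 0 (j + 1) 1).map (fun t => pyCell grid t (j - t))))) ||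
  ((PySem.List.pyRange 1 n 1).any (fun i =>
      scanRun symbol win_cond 0 ((PySem.List.pyRange 0 (n - i) 1).map (fun t => pyCell grid (i + t) (n - 1 - t)))))

-- ===== PRECONDITION & SPEC =====
-- Pre_ admits any grid when win_cond > len(grid) (A returns False touching no cell) and,
-- for win_cond <= 0, whenever the first cell both programs would read exists; otherwise it
-- excludes ragged grids with a row shorter than len(grid): A indexes the board as an
-- n×n square (n = len(grid)) and generally raises IndexError there.
def Pre_assess_victory (grid : List (List String)) (symbol : String) (win_cond : Int) : Prop :=
  (grid.length : Int) < win_cond ∨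
  (win_cond ≤ 0 ∧ (grid.length = 0 ∨ 0 < (grid.getD 0 []).length)) ∨
  ∀ row ∈ grid, grid.length ≤ row.length
instance (grid : List (List String)) (symbol : String) (win_cond : Int) : Decidable (Pre_assess_victory grid symbol win_cond) := by unfold Pre_assess_victory; infer_instance

def pvWitness_assess_victory : List (List String) × String × Int :=
  ([["X", "O"], ["O", "X"]], "X", 2)

def Spec_assess_victory (grid : List (List String)) (symbol : String) (win_cond : Int) (out : Bool) : Prop := out = assess_victory_alt grid symbol win_cond
instance (grid : List (List String)) (symbol : String) (win_cond : Int) (out : Bool) : Decidable (Spec_assess_victory grid symbol win_cond out) := by unfold Spec_assess_victory; infer_instance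

-- ===== CLAIM (what is proved, stated in full; the proofs are below) =====
def Claim_equal_assess_victory : Prop := ∀ (grid : List (List String)) (symbol : String) (win_cond : Int), Dom_assess_victory grid symbol win_cond → Pre_assess_victory grid symbol win_cond → Spec_assess_victory grid symbol win_cond (assess_victory grid symbol win_cond)

-- ===== LEMMAS AND PROOFS =====

-- the n×n board as a total Nat-indexed function (proof-side view of pyCell)
def cellN (grid : List (List String)) (r c : Nat) : String :=
  (grid.getD r []).getD c ""

theorem pyCell_natCast (grid : List (List String)) (r c : Nat) :
    pyCell grid (r : Int) (c : Int) = cellN grid r c := by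
  simp [pyCell, cellN, PySem.List.pyGetD_natCast]

theorem scanRun_nonpos (symbol : String) (win_cond : Int) (hw : win_cond ≤ 0)
    (run : Int) (hr : 0 ≤ run) (x : String) (xs : List String) :
    scanRun symbol win_cond run (x :: xs) = true := by
  unfold scanRun
  split <;> simp <;> omega

theorem scanRun_iff (symbol : String) (k : Nat) (hk : 1 ≤ k) :
    ∀ (l : List String) (r : Nat),
      (scanRun symbol (k : Int) (r : Int) l = true ↔
        ∃ j, j < l.length ∧ k ≤ r + j + 1 ∧
          ∀ t, t ≤ j → j < k + t → (l.getD t "" == symbol) = true) := by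
  intro l
  induction l with
  | nil => intro r; simp [scanRun]
  | cons x xs ih =>
    intro r
    unfold scanRun
    by_cases hm : (x == symbol) = true
    · simp only [hm, if_true]
      by_cases htr : (k : Int) ≤ (r : Int) + 1
      · rw [if_pos htr]
        constructor
        · intro _
          refine ⟨0, by simp, by omega, ?_⟩
          intro t ht1 ht2
          have : t = 0 := by omega
          subst this
          simpa using hm
        · intro _; rfl
      · rw [if_neg htr]
        have hcast : (r : Int) + 1 = ((r + 1 : Nat) : Int) := by push_cast; ring
        rw [hcast, ih (r + 1)]
        constructor
        · rintro ⟨j, hj, hkr, hall⟩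
          refine ⟨j + 1, by simpa using Nat.succ_lt_succ hj, by omega, ?_⟩
          intro t ht1 ht2
          cases t with
          | zero => simpa using hm
          | succ t' => simpa using hall t' (by omega) (by omega)
        · rintro ⟨j, hj, hkr, hall⟩
          cases j with
          | zero => exact absurd (by omega : (k : Int) ≤ (r : Int) + 1) htr
          | succ j' =>
            refine ⟨j', by simpa using hj, by omega, ?_⟩
            intro t ht1 ht2
            simpa using hall (t + 1) (by omega) (by omega)
    · simp only [Bool.not_eq_true] at hm
      simp only [hm, Bool.false_eq_true, reduceIte]
      rw [if_neg (by omega : ¬ ((k : Int) ≤ 0))]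
      rw [show (0 : Int) = ((0 : Nat) : Int) from rfl, ih 0]
      constructor
      · rintro ⟨j, hj, hkr, hall⟩
        refine ⟨j + 1, by simpa using Nat.succ_lt_succ hj, by omega, ?_⟩
        intro t ht1 ht2
        cases t with
        | zero => exact absurd (by omega : k ≤ j + 1) (by omega)
        | succ t' => simpa using hall t' (by omega) (by omega)
      · rintro ⟨j, hj, hkr, hall⟩
        cases j with
        | zero =>
          have := hall 0 (Nat.le_refl 0) (by omega)
          simp [hm] at this
        | succ j' =>
          have hk' : k ≤ j' + 1 := by
            by_contra h
            have := hall 0 (by omega) (by omega)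
            simp [hm] at this
          refine ⟨j', by simpa using hj, by omega, ?_⟩
          intro t ht1 ht2
          simpa using hall (t + 1) (by omega) (by omega)

theorem scan_window (symbol : String) (k : Nat) (hk : 1 ≤ k) (l : List String) :
    scanRun symbol (k : Int) 0 l = true ↔
      ∃ i, i + k ≤ l.length ∧ ∀ t, t < k → (l.getD (i + t) "" == symbol) = true := by
  have h := scanRun_iff symbol k hk l 0
  rw [show ((0 : Nat) : Int) = (0 : Int) from rfl] at h
  rw [h]
  constructor
  · rintro ⟨j, hj, hkj, hall⟩
    refine ⟨j + 1 - k, by omega, ?_⟩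
    intro t ht
    have := hall (j + 1 - k + t) (by omega) (by omega)
    exact this
  · rintro ⟨i, hik, hall⟩
    refine ⟨i + k - 1, by omega, by omega, ?_⟩
    intro t ht1 ht2
    have := hall (t - i) (by omega)
    rwa [show i + (t - i) = t by omega] at this


theorem vline_iff (f : Int → String) (a b : Int) (symbol : String) :
    (validate_line ((PySem.List.pyRange a b 1).map f) symbol = true) ↔
      ∀ i : Int, a ≤ i → i < b → (f i == symbol) = true := by
  simp only [validate_line, List.all_eq_true, List.mem_map]
  constructor
  · intro h i h1 h2
    exact h (f i) ⟨i, PySem.List.mem_pyRange_one.mpr ⟨h1, h2⟩, rfl⟩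
  · rintro h x ⟨i, hi, rfl⟩
    obtain ⟨h1, h2⟩ := PySem.List.mem_pyRange_one.mp hi
    exact h i h1 h2

theorem line_window (f : Int → String) (m : Nat) (symbol : String) (k : Nat) (hk : 1 ≤ k) :
    (scanRun symbol (k : Int) 0 ((PySem.List.pyRange 0 (m : Int) 1).map f) = true) ↔
      ∃ i, i + k ≤ m ∧ ∀ t, t < k → (f ((i : Int) + (t : Int)) == symbol) = true := by
  rw [scan_window symbol k hk]
  have hlen : ((PySem.List.pyRange 0 (m : Int) 1).map f).length = m := by
    simp [PySem.List.length_pyRange_one]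
  rw [hlen]
  have hget : ∀ i t : Nat, i + t < m →
      ((PySem.List.pyRange 0 (m : Int) 1).map f).getD (i + t) "" = f ((i : Int) + (t : Int)) := by
    intro i t h
    rw [← PySem.List.pyGetD_natCast, PySem.List.pyGetD_map_pyRange f m (i + t) "" h]
    exact congrArg f (by push_cast; ring)
  constructor
  · rintro ⟨i, him, hall⟩
    refine ⟨i, him, ?_⟩
    intro t ht
    have h1 := hall t ht
    rwa [hget i t (by omega)] at h1
  · rintro ⟨i, him, hall⟩
    refine ⟨i, him, ?_⟩
    intro t ht
    have h1 := hall t ht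
    rwa [hget i t (by omega)]

theorem A_nonpos (g : List (List String)) (s : String) (wc : Int) (hw : wc ≤ 0) :
    (assess_victory g s wc = true) ↔ 0 < g.length := by
  unfold assess_victory
  rcases Nat.eq_zero_or_pos g.length with hn | hn
  · rw [hn]
    simp [PySem.List.pyRange_one_eq_nil (by omega : (0 : Int) ≤ 0)]
  · simp only [iff_true_intro hn, iff_true]
    rw [List.any_eq_true]
    refine ⟨0, PySem.List.mem_pyRange_one.mpr ⟨le_refl 0, by exact_mod_cast hn⟩, ?_⟩
    rw [List.any_eq_true]
    refine ⟨0, PySem.List.mem_pyRange_one.mpr ⟨le_refl 0, by exact_mod_cast hn⟩, ?_⟩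
    simp [validate_line, PySem.List.pyRange_one_eq_nil (a := 0) (b := wc) hw]
    omega

theorem B_nonpos (g : List (List String)) (s : String) (wc : Int) (hw : wc ≤ 0) :
    (assess_victory_alt g s wc = true) ↔ 0 < g.length := by
  unfold assess_victory_alt
  rw [if_neg (by have := Int.natCast_nonneg g.length; omega : ¬ ((g.length : Int) < wc))]
  rcases Nat.eq_zero_or_pos g.length with hn | hn
  · rw [hn]
    simp [PySem.List.pyRange_one_eq_nil (by omega : (0 : Int) ≤ 0),
          PySem.List.pyRange_one_eq_nil (by omega : (0 : Int) ≤ 1)]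
  · simp only [iff_true_intro hn, iff_true, Bool.or_eq_true]
    left; left; left; left; left
    rw [List.any_eq_true]
    refine ⟨0, PySem.List.mem_pyRange_one.mpr ⟨le_refl 0, by exact_mod_cast hn⟩, ?_⟩
    rw [PySem.List.pyRange_one_cons (by exact_mod_cast hn : (0 : Int) < (g.length : Int))]
    rw [List.map_cons]
    exact scanRun_nonpos s wc hw 0 (le_refl 0) _ _


def winH (g : List (List String)) (s : String) (k n r c : Nat) : Prop :=
  c + k ≤ n ∧ ∀ t, t < k → (cellN g r (c + t) == s) = true
def winV (g : List (List String)) (s : String) (k n r c : Nat) : Prop :=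
  r + k ≤ n ∧ ∀ t, t < k → (cellN g (r + t) c == s) = true
def winD (g : List (List String)) (s : String) (k n r c : Nat) : Prop :=
  r + k ≤ n ∧ c + k ≤ n ∧ ∀ t, t < k → (cellN g (r + t) (c + t) == s) = true
def winA (g : List (List String)) (s : String) (k n r c : Nat) : Prop :=
  r + k ≤ n ∧ k ≤ c + 1 ∧ c < n ∧ ∀ t, t < k → (cellN g (r + t) (c - t) == s) = true

theorem A_charN (g : List (List String)) (s : String) (k : Nat) (hk : 1 ≤ k) :
    (assess_victory g s (k : Int) = true) ↔
      ∃ r, r < g.length ∧ ∃ c, c < g.length ∧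
        (winH g s k g.length r c ∨ winV g s k g.length r c ∨
         winD g s k g.length r c ∨ winA g s k g.length r c) := by
  unfold assess_victory
  simp only [List.any_eq_true, Bool.or_eq_true, Bool.and_eq_true, decide_eq_true_eq]
  constructor
  · rintro ⟨row, hrow, col, hcol, hd⟩
    rw [PySem.List.mem_pyRange_one] at hrow hcol
    obtain ⟨rN, rfl⟩ : ∃ m : Nat, row = (m : Int) := ⟨row.toNat, by omega⟩
    obtain ⟨cN, rfl⟩ : ∃ m : Nat, col = (m : Int) := ⟨col.toNat, by omega⟩
    refine ⟨rN, by omega, cN, by omega, ?_⟩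
    rcases hd with ((⟨hc1, hl⟩ | ⟨hc1, hl⟩) | ⟨⟨hc1, hc2⟩, hl⟩) | ⟨⟨hc1, hc2⟩, hl⟩
    · left
      rw [vline_iff] at hl
      refine ⟨by omega, ?_⟩
      intro t ht
      have h := hl ((cN + t : Nat) : Int) (by push_cast; omega) (by push_cast; omega)
      rwa [pyCell_natCast] at h
    · right; left
      rw [vline_iff] at hl
      refine ⟨by omega, ?_⟩
      intro t ht
      have h := hl ((rN + t : Nat) : Int) (by push_cast; omega) (by push_cast; omega)
      rwa [pyCell_natCast] at h
    · right; right; left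
      rw [vline_iff] at hl
      refine ⟨by omega, by omega, ?_⟩
      intro t ht
      have h := hl ((rN + t : Nat) : Int) (by push_cast; omega) (by push_cast; omega)
      rw [show ((rN + t : Nat) : Int) + (cN : Int) - (rN : Int) = ((cN + t : Nat) : Int) by
        push_cast; ring] at h
      rwa [pyCell_natCast] at h
    · right; right; right
      rw [vline_iff] at hl
      have hkc : k ≤ cN + 1 := by omega
      refine ⟨by omega, hkc, by omega, ?_⟩
      intro t ht
      have h := hl ((rN + t : Nat) : Int) (by push_cast; omega) (by push_cast; omega)
      rw [show (cN : Int) - (((rN + t : Nat) : Int) - (rN : Int)) = ((cN - t : Nat) : Int) by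
        rw [Nat.cast_sub (by omega : t ≤ cN)]; push_cast; ring] at h
      rwa [pyCell_natCast] at h
  · rintro ⟨rN, hr, cN, hc, hd⟩
    refine ⟨(rN : Int), PySem.List.mem_pyRange_one.mpr ⟨Int.natCast_nonneg _, by omega⟩,
            (cN : Int), PySem.List.mem_pyRange_one.mpr ⟨Int.natCast_nonneg _, by omega⟩, ?_⟩
    rcases hd with ⟨h1, hall⟩ | ⟨h1, hall⟩ | ⟨h1, h2, hall⟩ | ⟨h1, h2, h3, hall⟩
    · refine Or.inl (Or.inl (Or.inl ⟨by push_cast; omega, ?_⟩))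
      rw [vline_iff]
      intro i hi1 hi2
      obtain ⟨t, rfl, ht⟩ : ∃ t : Nat, i = ((cN + t : Nat) : Int) ∧ t < k :=
        ⟨(i - cN).toNat, by omega, by omega⟩
      rw [pyCell_natCast]
      exact hall _ ht
    · refine Or.inl (Or.inl (Or.inr ⟨by push_cast; omega, ?_⟩))
      rw [vline_iff]
      intro i hi1 hi2
      obtain ⟨t, rfl, ht⟩ : ∃ t : Nat, i = ((rN + t : Nat) : Int) ∧ t < k :=
        ⟨(i - rN).toNat, by omega, by omega⟩
      rw [pyCell_natCast]
      exact hall _ ht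
    · refine Or.inl (Or.inr ⟨⟨by push_cast; omega, by push_cast; omega⟩, ?_⟩)
      rw [vline_iff]
      intro i hi1 hi2
      obtain ⟨t, rfl, ht⟩ : ∃ t : Nat, i = ((rN + t : Nat) : Int) ∧ t < k :=
        ⟨(i - rN).toNat, by omega, by omega⟩
      rw [show ((rN + t : Nat) : Int) + (cN : Int) - (rN : Int) = ((cN + t : Nat) : Int) by
        push_cast; ring]
      rw [pyCell_natCast]
      exact hall _ ht
    · refine Or.inr ⟨⟨by push_cast; omega, by push_cast; omega⟩, ?_⟩
      rw [vline_iff]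
      intro i hi1 hi2
      obtain ⟨t, rfl, ht⟩ : ∃ t : Nat, i = ((rN + t : Nat) : Int) ∧ t < k :=
        ⟨(i - rN).toNat, by omega, by omega⟩
      rw [show (cN : Int) - (((rN + t : Nat) : Int) - (rN : Int)) = ((cN - t : Nat) : Int) by
        rw [Nat.cast_sub (by omega : t ≤ cN)]; push_cast; ring]
      rw [pyCell_natCast]
      exact hall _ ht

theorem B_charN (g : List (List String)) (s : String) (k : Nat) (hk : 1 ≤ k)
    (hkn : k ≤ g.length) :
    (assess_victory_alt g s (k : Int) = true) ↔
      (((((∃ r, r < g.length ∧ ∃ i, i + k ≤ g.length ∧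
              ∀ t, t < k → (cellN g r (i + t) == s) = true) ∨
          (∃ c, c < g.length ∧ ∃ i, i + k ≤ g.length ∧
              ∀ t, t < k → (cellN g (i + t) c == s) = true)) ∨
          (∃ j, j < g.length ∧ ∃ i, i + k ≤ g.length - j ∧
              ∀ t, t < k → (cellN g (i + t) (j + (i + t)) == s) = true)) ∨
          (∃ i0, 1 ≤ i0 ∧ i0 < g.length ∧ ∃ w, w + k ≤ g.length - i0 ∧
              ∀ t, t < k → (cellN g (i0 + (w + t)) (w + t) == s) = true)) ∨
          (∃ j, j < g.length ∧ ∃ i, i + k ≤ j + 1 ∧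
              ∀ t, t < k → (cellN g (i + t) (j - (i + t)) == s) = true)) ∨
          (∃ i0, 1 ≤ i0 ∧ i0 < g.length ∧ ∃ w, w + k ≤ g.length - i0 ∧
              ∀ t, t < k → (cellN g (i0 + (w + t)) (g.length - 1 - (w + t)) == s) = true) := by
  unfold assess_victory_alt
  rw [if_neg (by omega : ¬ ((g.length : Int) < (k : Int)))]
  simp only [Bool.or_eq_true, List.any_eq_true]
  refine or_congr (or_congr (or_congr (or_congr (or_congr ?_ ?_) ?_) ?_) ?_) ?_
  · -- rows
    constructor
    · rintro ⟨r, hr, hscan⟩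
      rw [PySem.List.mem_pyRange_one] at hr
      obtain ⟨rN, rfl⟩ : ∃ m : Nat, r = (m : Int) := ⟨r.toNat, by omega⟩
      rw [line_window _ _ _ _ hk] at hscan
      obtain ⟨i, hik, hall⟩ := hscan
      refine ⟨rN, by omega, i, hik, ?_⟩
      intro t ht
      have h := hall t ht
      have hcast : (i : Int) + (t : Int) = ((i + t : Nat) : Int) := by push_cast; ring
      simp only [hcast, pyCell_natCast] at h
      exact h
    · rintro ⟨rN, hrn, i, hik, hall⟩
      refine ⟨(rN : Int), PySem.List.mem_pyRange_one.mpr ⟨Int.natCast_nonneg _, by omega⟩, ?_⟩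
      rw [line_window _ _ _ _ hk]
      refine ⟨i, hik, ?_⟩
      intro t ht
      have hcast : (i : Int) + (t : Int) = ((i + t : Nat) : Int) := by push_cast; ring
      simp only [hcast, pyCell_natCast]
      exact hall t ht
  · -- columns
    constructor
    · rintro ⟨c, hc, hscan⟩
      rw [PySem.List.mem_pyRange_one] at hc
      obtain ⟨cN, rfl⟩ : ∃ m : Nat, c = (m : Int) := ⟨c.toNat, by omega⟩
      rw [line_window _ _ _ _ hk] at hscan
      obtain ⟨i, hik, hall⟩ := hscan
      refine ⟨cN, by omega, i, hik, ?_⟩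
      intro t ht
      have h := hall t ht
      have hcast : (i : Int) + (t : Int) = ((i + t : Nat) : Int) := by push_cast; ring
      simp only [hcast, pyCell_natCast] at h
      exact h
    · rintro ⟨cN, hcn, i, hik, hall⟩
      refine ⟨(cN : Int), PySem.List.mem_pyRange_one.mpr ⟨Int.natCast_nonneg _, by omega⟩, ?_⟩
      rw [line_window _ _ _ _ hk]
      refine ⟨i, hik, ?_⟩
      intro t ht
      have hcast : (i : Int) + (t : Int) = ((i + t : Nat) : Int) := by push_cast; ring
      simp only [hcast, pyCell_natCast]
      exact hall t ht
  · -- down-right diagonals from the top row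
    constructor
    · rintro ⟨j, hj, hscan⟩
      rw [PySem.List.mem_pyRange_one] at hj
      obtain ⟨jN, rfl⟩ : ∃ m : Nat, j = (m : Int) := ⟨j.toNat, by omega⟩
      rw [show ((g.length : Int) - (jN : Int)) = ((g.length - jN : Nat) : Int) by omega] at hscan
      rw [line_window _ _ _ _ hk] at hscan
      obtain ⟨i, hik, hall⟩ := hscan
      refine ⟨jN, by omega, i, hik, ?_⟩
      intro t ht
      have h := hall t ht
      have hcast : (i : Int) + (t : Int) = ((i + t : Nat) : Int) := by push_cast; ring
      have hcast2 : (jN : Int) + ((i + t : Nat) : Int) = ((jN + (i + t) : Nat) : Int) := by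
        push_cast; ring
      simp only [hcast, hcast2, pyCell_natCast] at h
      exact h
    · rintro ⟨jN, hjn, i, hik, hall⟩
      refine ⟨(jN : Int), PySem.List.mem_pyRange_one.mpr ⟨Int.natCast_nonneg _, by omega⟩, ?_⟩
      rw [show ((g.length : Int) - (jN : Int)) = ((g.length - jN : Nat) : Int) by omega]
      rw [line_window _ _ _ _ hk]
      refine ⟨i, hik, ?_⟩
      intro t ht
      have hcast : (i : Int) + (t : Int) = ((i + t : Nat) : Int) := by push_cast; ring
      have hcast2 : (jN : Int) + ((i + t : Nat) : Int) = ((jN + (i + t) : Nat) : Int) := by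
        push_cast; ring
      simp only [hcast, hcast2, pyCell_natCast]
      exact hall t ht
  · -- down-right diagonals from the left column
    constructor
    · rintro ⟨i0, hi0, hscan⟩
      rw [PySem.List.mem_pyRange_one] at hi0
      obtain ⟨iN, rfl⟩ : ∃ m : Nat, i0 = (m : Int) := ⟨i0.toNat, by omega⟩
      rw [show ((g.length : Int) - (iN : Int)) = ((g.length - iN : Nat) : Int) by omega] at hscan
      rw [line_window _ _ _ _ hk] at hscan
      obtain ⟨w, hwk, hall⟩ := hscan
      refine ⟨iN, by omega, by omega, w, hwk, ?_⟩
      intro t ht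
      have h := hall t ht
      have hcast : (w : Int) + (t : Int) = ((w + t : Nat) : Int) := by push_cast; ring
      have hcast2 : (iN : Int) + ((w + t : Nat) : Int) = ((iN + (w + t) : Nat) : Int) := by
        push_cast; ring
      simp only [hcast, hcast2, pyCell_natCast] at h
      exact h
    · rintro ⟨iN, h1, h2, w, hwk, hall⟩
      refine ⟨(iN : Int), PySem.List.mem_pyRange_one.mpr ⟨by omega, by omega⟩, ?_⟩
      rw [show ((g.length : Int) - (iN : Int)) = ((g.length - iN : Nat) : Int) by omega]
      rw [line_window _ _ _ _ hk]
      refine ⟨w, hwk, ?_⟩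
      intro t ht
      have hcast : (w : Int) + (t : Int) = ((w + t : Nat) : Int) := by push_cast; ring
      have hcast2 : (iN : Int) + ((w + t : Nat) : Int) = ((iN + (w + t) : Nat) : Int) := by
        push_cast; ring
      simp only [hcast, hcast2, pyCell_natCast]
      exact hall t ht
  · -- down-left diagonals from the top row
    constructor
    · rintro ⟨j, hj, hscan⟩
      rw [PySem.List.mem_pyRange_one] at hj
      obtain ⟨jN, rfl⟩ : ∃ m : Nat, j = (m : Int) := ⟨j.toNat, by omega⟩
      rw [show ((jN : Int) + 1) = ((jN + 1 : Nat) : Int) by push_cast; ring] at hscan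
      rw [line_window _ _ _ _ hk] at hscan
      obtain ⟨i, hik, hall⟩ := hscan
      refine ⟨jN, by omega, i, hik, ?_⟩
      intro t ht
      have h := hall t ht
      have hcast : (i : Int) + (t : Int) = ((i + t : Nat) : Int) := by push_cast; ring
      have hcast2 : (jN : Int) - ((i + t : Nat) : Int) = ((jN - (i + t) : Nat) : Int) := by
        omega
      simp only [hcast, hcast2, pyCell_natCast] at h
      exact h
    · rintro ⟨jN, hjn, i, hik, hall⟩
      refine ⟨(jN : Int), PySem.List.mem_pyRange_one.mpr ⟨Int.natCast_nonneg _, by omega⟩, ?_⟩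
      rw [show ((jN : Int) + 1) = ((jN + 1 : Nat) : Int) by push_cast; ring]
      rw [line_window _ _ _ _ hk]
      refine ⟨i, hik, ?_⟩
      intro t ht
      have hcast : (i : Int) + (t : Int) = ((i + t : Nat) : Int) := by push_cast; ring
      have hcast2 : (jN : Int) - ((i + t : Nat) : Int) = ((jN - (i + t) : Nat) : Int) := by
        omega
      simp only [hcast, hcast2, pyCell_natCast]
      exact hall t ht
  · -- down-left diagonals from the right column
    constructor
    · rintro ⟨i0, hi0, hscan⟩
      rw [PySem.List.mem_pyRange_one] at hi0
      obtain ⟨iN, rfl⟩ : ∃ m : Nat, i0 = (m : Int) := ⟨i0.toNat, by omega⟩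
      rw [show ((g.length : Int) - (iN : Int)) = ((g.length - iN : Nat) : Int) by omega] at hscan
      rw [line_window _ _ _ _ hk] at hscan
      obtain ⟨w, hwk, hall⟩ := hscan
      refine ⟨iN, by omega, by omega, w, hwk, ?_⟩
      intro t ht
      have h := hall t ht
      have hcast : (w : Int) + (t : Int) = ((w + t : Nat) : Int) := by push_cast; ring
      have hcast2 : (iN : Int) + ((w + t : Nat) : Int) = ((iN + (w + t) : Nat) : Int) := by
        push_cast; ring
      have hcast3 : (g.length : Int) - 1 - ((w + t : Nat) : Int)
          = ((g.length - 1 - (w + t) : Nat) : Int) := by omega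
      simp only [hcast, hcast2, hcast3, pyCell_natCast] at h
      exact h
    · rintro ⟨iN, h1, h2, w, hwk, hall⟩
      refine ⟨(iN : Int), PySem.List.mem_pyRange_one.mpr ⟨by omega, by omega⟩, ?_⟩
      rw [show ((g.length : Int) - (iN : Int)) = ((g.length - iN : Nat) : Int) by omega]
      rw [line_window _ _ _ _ hk]
      refine ⟨w, hwk, ?_⟩
      intro t ht
      have hcast : (w : Int) + (t : Int) = ((w + t : Nat) : Int) := by push_cast; ring
      have hcast2 : (iN : Int) + ((w + t : Nat) : Int) = ((iN + (w + t) : Nat) : Int) := by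
        push_cast; ring
      have hcast3 : (g.length : Int) - 1 - ((w + t : Nat) : Int)
          = ((g.length - 1 - (w + t) : Nat) : Int) := by omega
      simp only [hcast, hcast2, hcast3, pyCell_natCast]
      exact hall t ht


theorem A_gt (g : List (List String)) (s : String) (wc : Int) (hgt : (g.length : Int) < wc) :
    assess_victory g s wc = false := by
  unfold assess_victory
  rw [Bool.eq_false_iff]
  intro h
  rw [List.any_eq_true] at h
  obtain ⟨row, hrow, h⟩ := h
  rw [List.any_eq_true] at h
  obtain ⟨col, hcol, h⟩ := h
  rw [PySem.List.mem_pyRange_one] at hrow hcol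
  simp only [Bool.or_eq_true, Bool.and_eq_true, decide_eq_true_eq] at h
  rcases h with ((⟨h1, _⟩ | ⟨h1, _⟩) | ⟨⟨h1, _⟩, _⟩) | ⟨⟨h1, _⟩, _⟩ <;> omega

theorem windows_equiv (g : List (List String)) (s : String) (k n : Nat) (hk : 1 ≤ k) :
    (∃ r, r < n ∧ ∃ c, c < n ∧
        (winH g s k n r c ∨ winV g s k n r c ∨ winD g s k n r c ∨ winA g s k n r c)) ↔
      (((((∃ r, r < n ∧ ∃ i, i + k ≤ n ∧ ∀ t, t < k → (cellN g r (i + t) == s) = true) ∨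
          (∃ c, c < n ∧ ∃ i, i + k ≤ n ∧ ∀ t, t < k → (cellN g (i + t) c == s) = true)) ∨
          (∃ j, j < n ∧ ∃ i, i + k ≤ n - j ∧
              ∀ t, t < k → (cellN g (i + t) (j + (i + t)) == s) = true)) ∨
          (∃ i0, 1 ≤ i0 ∧ i0 < n ∧ ∃ w, w + k ≤ n - i0 ∧
              ∀ t, t < k → (cellN g (i0 + (w + t)) (w + t) == s) = true)) ∨
          (∃ j, j < n ∧ ∃ i, i + k ≤ j + 1 ∧
              ∀ t, t < k → (cellN g (i + t) (j - (i + t)) == s) = true)) ∨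
          (∃ i0, 1 ≤ i0 ∧ i0 < n ∧ ∃ w, w + k ≤ n - i0 ∧
              ∀ t, t < k → (cellN g (i0 + (w + t)) (n - 1 - (w + t)) == s) = true) := by
  constructor
  · rintro ⟨r, hr, c, hc, hd⟩
    rcases hd with ⟨h1, hall⟩ | ⟨h1, hall⟩ | ⟨h1, h2, hall⟩ | ⟨h1, h2, h3, hall⟩
    · exact Or.inl (Or.inl (Or.inl (Or.inl (Or.inl ⟨r, hr, c, h1, hall⟩))))
    · exact Or.inl (Or.inl (Or.inl (Or.inl (Or.inr ⟨c, hc, r, h1, hall⟩))))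
    · rcases Nat.lt_or_ge c r with hrc | hrc
      · refine Or.inl (Or.inl (Or.inr ⟨r - c, by omega, by omega, c, by omega, ?_⟩))
        intro t ht
        rw [show r - c + (c + t) = r + t by omega]
        exact hall t ht
      · refine Or.inl (Or.inl (Or.inl (Or.inr ⟨c - r, by omega, r, by omega, ?_⟩)))
        intro t ht
        rw [show c - r + (r + t) = c + t by omega]
        exact hall t ht
    · rcases Nat.lt_or_ge (r + c) n with hs | hs
      · refine Or.inl (Or.inr ⟨r + c, hs, r, by omega, ?_⟩)
        intro t ht
        rw [show r + c - (r + t) = c - t by omega]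
        exact hall t ht
      · refine Or.inr ⟨r + c + 1 - n, by omega, by omega, n - 1 - c, by omega, ?_⟩
        intro t ht
        rw [show r + c + 1 - n + (n - 1 - c + t) = r + t by omega,
            show n - 1 - (n - 1 - c + t) = c - t by omega]
        exact hall t ht
  · rintro (((((⟨r, hr, i, hik, hall⟩ | ⟨c, hc, i, hik, hall⟩) | ⟨j, hj, i, hik, hall⟩) |
        ⟨i0, h1, h2, w, hwk, hall⟩) | ⟨j, hj, i, hik, hall⟩) | ⟨i0, h1, h2, w, hwk, hall⟩)
    · exact ⟨r, hr, i, by omega, Or.inl ⟨hik, hall⟩⟩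
    · exact ⟨i, by omega, c, hc, Or.inr (Or.inl ⟨hik, hall⟩)⟩
    · refine ⟨i, by omega, j + i, by omega, Or.inr (Or.inr (Or.inl ⟨by omega, by omega, ?_⟩))⟩
      intro t ht
      rw [show j + i + t = j + (i + t) by omega]
      exact hall t ht
    · refine ⟨i0 + w, by omega, w, by omega, Or.inr (Or.inr (Or.inl ⟨by omega, by omega, ?_⟩))⟩
      intro t ht
      rw [show i0 + w + t = i0 + (w + t) by omega]
      exact hall t ht
    · refine ⟨i, by omega, j - i, by omega,
        Or.inr (Or.inr (Or.inr ⟨by omega, by omega, by omega, ?_⟩))⟩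
      intro t ht
      rw [show i + t = i + t from rfl, show j - i - t = j - (i + t) by omega]
      exact hall t ht
    · refine ⟨i0 + w, by omega, n - 1 - w, by omega,
        Or.inr (Or.inr (Or.inr ⟨by omega, by omega, by omega, ?_⟩))⟩
      intro t ht
      rw [show i0 + w + t = i0 + (w + t) by omega,
          show n - 1 - w - t = n - 1 - (w + t) by omega]
      exact hall t ht

-- ===== VERDICT (by name: the statement is the Claim_ definition above) =====
theorem assess_victory_spec : Claim_equal_assess_victory := by
  intro grid symbol wc _ _
  unfold Spec_assess_victory
  rw [Bool.eq_iff_iff]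
  by_cases hw : wc ≤ 0
  · rw [A_nonpos grid symbol wc hw, B_nonpos grid symbol wc hw]
  · by_cases hgt : (grid.length : Int) < wc
    · rw [A_gt grid symbol wc hgt]
      unfold assess_victory_alt
      rw [if_pos hgt]
    · obtain ⟨k, rfl⟩ : ∃ k : Nat, wc = (k : Int) := ⟨wc.toNat, by omega⟩
      have hk : 1 ≤ k := by omega
      rw [A_charN grid symbol k hk, B_charN grid symbol k hk (by omega)]
      exact windows_equiv grid symbol k grid.length hk
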